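-- pv_equiv track=rewrite | github.com/xmstu/leetcode_python | exam/tower.py | solve
-- ===== SOURCE A (Python) =====
-- def solve(n, h):
--     h = [0] + h
--     dp = [0] * 5010
--     g_len = [0] * 5010
--     preSum = [0] * 5010
--
--     for i in range(1, n+1):
--         preSum[i] = preSum[i-1] + h[i]
--
--     g_len[1] = preSum[1]
--     dp[1] = 1
--     for i in range(2, n+1):
--         for j in range(i - 1, -1, -1):
--             if preSum[i] - preSum[j] >= g_len[j]:
--                 dp[i] = dp[j] + 1
--                 g_len[i] = preSum[i] - preSum[j]
--                 break
--
--     return n - dp[n]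
-- ===== SOURCE B (Python) =====
-- def solve(n, h):
--     # Monotone candidate stack + binary search: A's descending scan picks the
--     # largest j with preSum[i] - preSum[j] >= g_len[j], i.e. the largest j with
--     # c[j] := preSum[j] + g_len[j] <= preSum[i].  A j is useless once a later j'
--     # has c[j'] <= c[j], so a stack of surviving candidates has strictly
--     # increasing c and the wanted j is found by binary search.
--     if n <= 0:
--         return n
--     stk = [(0, 0, 0)]  # (c, dp, preSum) of surviving candidate indices, c strictly increasing
--     pre = 0
--     dp_i = 0
--     for i in range(1, n + 1):
--         pre += h[i - 1]
--         if i == 1: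
--             dp_i, g = 1, pre
--         else:
--             lo, hi = 0, len(stk)
--             while lo < hi:  # rightmost entry with c <= pre
--                 mid = (lo + hi) // 2
--                 if stk[mid][0] <= pre:
--                     lo = mid + 1
--                 else:
--                     hi = mid
--             if lo == 0:
--                 dp_i, g = 0, 0
--             else:
--                 dp_i, g = stk[lo - 1][1] + 1, pre - stk[lo - 1][2]
--         c = pre + g
--         while stk and stk[-1][0] >= c:
--             stk.pop()
--         stk.append((c, dp_i, pre))
--     return n - dp_i
-- ===== Notes on version B (the rewrite author's own statement) =====
-- stated objective: faster
-- what changed: B replaces A's quadratic descending rescan over all previous breakpoints by a monotone candidate stack (a j is dead once a later j' has preSum[j']+g_len[j'] <= preSum[j]+g_len[j]) queried by binary search for the rightmost entry with preSum[j]+g_len[j] <= preSum[i], which is exactly the j A's scan picks.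
-- intended difference: On n = -5009 (with any list) A's final dp[n] lookup wraps around its 5010-slot scratch array onto the dp[1]=1 seed and A returns n-1 = -5010, while B returns n itself (no segments counted for a non-positive n), which is the intended value and what A itself returns for every other non-positive n. — e.g. on solve(-5009, []): A returns -5010, B returns -5009
import Mathlib
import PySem

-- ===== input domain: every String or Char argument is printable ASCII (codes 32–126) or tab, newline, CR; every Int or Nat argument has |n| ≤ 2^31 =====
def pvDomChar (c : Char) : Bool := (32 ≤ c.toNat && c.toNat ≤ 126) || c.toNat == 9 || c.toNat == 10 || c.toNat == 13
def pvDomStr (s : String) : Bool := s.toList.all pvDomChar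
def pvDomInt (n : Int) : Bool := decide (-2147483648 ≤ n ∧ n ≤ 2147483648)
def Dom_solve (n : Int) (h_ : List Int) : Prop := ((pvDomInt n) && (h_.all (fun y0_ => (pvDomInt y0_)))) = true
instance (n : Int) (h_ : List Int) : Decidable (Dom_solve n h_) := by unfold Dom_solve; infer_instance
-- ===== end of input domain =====

-- B replaces A's quadratic descending rescan (largest j with preSum[i]-preSum[j] >= g_len[j])
-- by a monotone candidate stack queried by binary search (the wanted j is the rightmost stack
-- entry with preSum[j]+g_len[j] <= preSum[i]); equal values everywhere A returns except the
-- n = -5009 negative-index-wraparound corner, stated as an intended difference below.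

-- ===== PORT A =====
-- first j in js satisfying p (Python's descending scan with break)
def aFind (p : Int → Bool) : List Int → Option Int
  | [] => none
  | j :: rest => if p j then some j else aFind p rest

def solve (n : Int) (h_ : List Int) : Int :=
  let h : List Int := 0 :: h_
  let dp0 : List Int := List.replicate 5010 0
  let gl0 : List Int := List.replicate 5010 0
  let ps0 : List Int := List.replicate 5010 0
  let ps : List Int := (PySem.List.pyRange 1 (n+1) 1).foldl
      (fun ps i => ps.set i.toNat
        (((PySem.List.pyGet? ps (i-1)).getD 0) + ((PySem.List.pyGet? h i).getD 0))) ps0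
  let gl1 := gl0.set 1 ((PySem.List.pyGet? ps 1).getD 0)
  let dp1 := dp0.set 1 1
  let st : List Int × List Int := (PySem.List.pyRange 2 (n+1) 1).foldl
      (fun st i =>
        match aFind (fun j =>
            ((PySem.List.pyGet? ps i).getD 0) - ((PySem.List.pyGet? ps j).getD 0)
              ≥ ((PySem.List.pyGet? st.2 j).getD 0)) (PySem.List.pyRange (i-1) (-1) (-1)) with
        | some j => (st.1.set i.toNat (((PySem.List.pyGet? st.1 j).getD 0) + 1),
                     st.2.set i.toNat
                       (((PySem.List.pyGet? ps i).getD 0) - ((PySem.List.pyGet? ps j).getD 0)))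
        | none => st) (dp1, gl1)
  n - ((PySem.List.pyGet? st.1 n).getD 0)

-- ===== PORT B =====
-- Source B's hand-written binary search loop (mid = (lo+hi)//2 inlined; the structural
-- fuel (hi-lo).toNat only bounds the iteration count and never changes the result)
def bsearchAux (stk : List (Int × Int × Int)) (pre : Int) : Nat → Int → Int → Int
  | 0, lo, _ => lo
  | fuel+1, lo, hi =>
    if lo < hi then
      if ((PySem.List.pyGet? stk (PySem.Int.floordiv (lo + hi) 2)).getD (0, 0, 0)).1 ≤ pre then
        bsearchAux stk pre fuel (PySem.Int.floordiv (lo + hi) 2 + 1) hi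
      else bsearchAux stk pre fuel lo (PySem.Int.floordiv (lo + hi) 2)
    else lo

def bsearch (stk : List (Int × Int × Int)) (pre : Int) (lo hi : Int) : Int :=
  bsearchAux stk pre (hi - lo).toNat lo hi

-- Source B's pop loop: while stk and stk[-1][0] >= c: stk.pop()  (fuel = stk.length suffices)
def bPopAux (c : Int) : Nat → List (Int × Int × Int) → List (Int × Int × Int)
  | 0, stk => stk
  | fuel+1, stk =>
    if stk ≠ [] ∧ c ≤ (stk.getLast?.getD (0, 0, 0)).1 then bPopAux c fuel stk.dropLast
    else stk

def bPop (c : Int) (stk : List (Int × Int × Int)) : List (Int × Int × Int) :=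
  bPopAux c stk.length stk

-- one iteration of Source B's main loop; state = (stk, pre, dp_i)
def bstepF (h_ : List Int) (st : List (Int × Int × Int) × Int × Int) (i : Int) :
    List (Int × Int × Int) × Int × Int :=
  let pre := st.2.1 + (PySem.List.pyGet? h_ (i - 1)).getD 0
  let dg : Int × Int :=
    if i = 1 then (1, pre)
    else
      let lo := bsearch st.1 pre 0 (st.1.length : Int)
      if lo = 0 then (0, 0)
      else (((PySem.List.pyGet? st.1 (lo - 1)).getD (0, 0, 0)).2.1 + 1,
            pre - ((PySem.List.pyGet? st.1 (lo - 1)).getD (0, 0, 0)).2.2)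
  let c := pre + dg.2
  (bPop c st.1 ++ [(c, dg.1, pre)], pre, dg.1)

def solve_alt (n : Int) (h_ : List Int) : Int :=
  if n ≤ 0 then n
  else n - ((PySem.List.pyRange 1 (n + 1) 1).foldl (bstepF h_) ([(0, 0, 0)], 0, 0)).2.2

-- ===== PRECONDITION & SPEC =====
-- Pre_ excludes exactly the inputs on which A raises IndexError: n > 5009 (its scratch arrays
-- have 5010 slots), n greater than the number of heights, or n < -5010 (final lookup out of range).
def Pre_solve (n : Int) (h_ : List Int) : Prop := -5010 ≤ n ∧ n ≤ 5009 ∧ n ≤ (h_.length : Int)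
instance (n : Int) (h_ : List Int) : Decidable (Pre_solve n h_) := by unfold Pre_solve; infer_instance
def pvWitness_solve : Int × List Int := (3, [3, 1, 9, 9])

-- On n = -5009 (any list) A's final dp[n] lookup wraps onto its dp[1] = 1 seed and returns n - 1;
-- B returns n itself (no segments for non-positive n), as A does for every other non-positive n.
def D_solve (n : Int) (h_ : List Int) : Prop := n = -5009
instance (n : Int) (h_ : List Int) : Decidable (D_solve n h_) := by unfold D_solve; infer_instance
def Spec_solve (n : Int) (h_ : List Int) (out : Int) : Prop := ¬ D_solve n h_ → out = solve_alt n h_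
instance (n : Int) (h_ : List Int) (out : Int) : Decidable (Spec_solve n h_ out) := by unfold Spec_solve; infer_instance
def pvDiffWitness_solve : Int × List Int := (-5009, [])
def pvDiffWitnessOut_solve : Int × Int := (-5010, -5009)

-- ===== CLAIM (what is proved, stated in full; the proofs are below) =====
def Claim_unchanged_solve : Prop := ∀ (n : Int) (h_ : List Int), Dom_solve n h_ → Pre_solve n h_ → Spec_solve n h_ (solve n h_)
def Claim_changed_solve : Prop := Dom_solve (pvDiffWitness_solve.1) (pvDiffWitness_solve.2) ∧ Pre_solve (pvDiffWitness_solve.1) (pvDiffWitness_solve.2) ∧ D_solve (pvDiffWitness_solve.1) (pvDiffWitness_solve.2) ∧ solve (pvDiffWitness_solve.1) (pvDiffWitness_solve.2) = pvDiffWitnessOut_solve.1 ∧ solve_alt (pvDiffWitness_solve.1) (pvDiffWitness_solve.2) = pvDiffWitnessOut_solve.2 ∧ pvDiffWitnessOut_solve.1 ≠ pvDiffWitnessOut_solve.2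
def Claim_exact_solve : Prop := ∀ (n : Int) (h_ : List Int), Dom_solve n h_ → Pre_solve n h_ → D_solve n h_ → solve n h_ ≠ solve_alt n h_

-- ===== LEMMAS AND PROOFS =====

def Pf (h_ : List Int) : Nat → Int
  | 0 => 0
  | k + 1 => Pf h_ k + h_.getD k 0

def findDesc (P : Nat → Prop) [DecidablePred P] : Nat → Option Nat
  | 0 => if P 0 then some 0 else none
  | k + 1 => if P (k + 1) then some (k + 1) else findDesc P k

def nextPair (h_ : List Int) (t : List (Int × Int)) (i : Nat) : Int × Int :=
  match findDesc (fun j => Pf h_ i - Pf h_ j ≥ (t.getD j (0, 0)).2) (i - 1) with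
  | some j => ((t.getD j (0, 0)).1 + 1, Pf h_ i - Pf h_ j)
  | none => (0, 0)

def specTbl (h_ : List Int) : Nat → List (Int × Int)
  | 0 => [(0, 0)]
  | 1 => [(0, 0), (1, Pf h_ 1)]
  | (i + 2) => specTbl h_ (i + 1) ++ [nextPair h_ (specTbl h_ (i + 1)) (i + 2)]

def dpS (h_ : List Int) (i : Nat) : Int := ((specTbl h_ i).getD i (0, 0)).1
def glS (h_ : List Int) (i : Nat) : Int := ((specTbl h_ i).getD i (0, 0)).2
def cS (h_ : List Int) (i : Nat) : Int := Pf h_ i + glS h_ i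

lemma specTbl_length (h_ : List Int) : ∀ (i : Nat), (specTbl h_ i).length = i + 1
  | 0 => rfl
  | 1 => rfl
  | (i+2) => by rw [specTbl, List.length_append, specTbl_length h_ (i+1)]; rfl

lemma specTbl_getD (h_ : List Int) : ∀ (i j : Nat), j ≤ i →
    (specTbl h_ i).getD j (0, 0) = (dpS h_ j, glS h_ j) := by
  intro i
  induction i with
  | zero =>
      intro j hj
      have hj0 : j = 0 := by omega
      subst hj0; simp [dpS, glS]
  | succ k ih =>
      intro j hj
      rcases eq_or_lt_of_le hj with he | hlt
      · subst he; simp [dpS, glS]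
      · have hjk : j ≤ k := by omega
        match k, ih with
        | 0, _ =>
            have hj0 : j = 0 := by omega
            subst hj0
            show (specTbl h_ 1).getD 0 (0, 0) = _
            simp [specTbl, dpS, glS, List.getD]
        | (k'+1), ih =>
            show (specTbl h_ (k'+2)).getD j (0, 0) = _
            rw [specTbl, List.getD_append _ _ _ _ (by rw [specTbl_length]; omega)]
            exact ih j hjk

lemma findDesc_congr (P Q : Nat → Prop) [DecidablePred P] [DecidablePred Q] (k : Nat)
    (h : ∀ j ≤ k, (P j ↔ Q j)) : findDesc P k = findDesc Q k := by
  induction k with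
  | zero =>
      simp only [findDesc]
      by_cases h0 : P 0
      · rw [if_pos h0, if_pos ((h 0 (le_refl 0)).1 h0)]
      · rw [if_neg h0, if_neg (fun hq => h0 ((h 0 (le_refl 0)).2 hq))]
  | succ k ih =>
      simp only [findDesc]
      by_cases h0 : P (k+1)
      · rw [if_pos h0, if_pos ((h (k+1) (le_refl _)).1 h0)]
      · rw [if_neg h0, if_neg (fun hq => h0 ((h (k+1) (le_refl _)).2 hq)),
            ih (fun j hj => h j (by omega))]

lemma findDesc_eq_none_iff (P : Nat → Prop) [DecidablePred P] (k : Nat) :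
    findDesc P k = none ↔ ∀ j ≤ k, ¬ P j := by
  induction k with
  | zero =>
      simp only [findDesc]
      constructor
      · intro h j hj
        have hj0 : j = 0 := by omega
        subst hj0
        intro hp; rw [if_pos hp] at h; simp at h
      · intro h; rw [if_neg (h 0 (le_refl 0))]
  | succ k ih =>
      simp only [findDesc]
      constructor
      · intro h j hj
        by_cases hk : P (k+1)
        · rw [if_pos hk] at h; simp at h
        · rw [if_neg hk] at h
          rcases eq_or_lt_of_le hj with he | hlt
          · subst he; exact hk
          · exact (ih.1 h) j (by omega)
      · intro h
        rw [if_neg (h (k+1) (le_refl _))]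
        exact ih.2 (fun j hj => h j (by omega))

lemma findDesc_eq_some (P : Nat → Prop) [DecidablePred P] (k j : Nat)
    (hj : j ≤ k) (hP : P j) (hmax : ∀ j', j < j' → j' ≤ k → ¬ P j') :
    findDesc P k = some j := by
  induction k with
  | zero =>
      have hj0 : j = 0 := by omega
      subst hj0
      simp only [findDesc, if_pos hP]
  | succ k ih =>
      rcases eq_or_lt_of_le hj with he | hlt
      · subst he; simp only [findDesc, if_pos hP]
      · simp only [findDesc, if_neg (hmax (k+1) (by omega) (le_refl _))]
        exact ih (by omega) (fun j' h1 h2 => hmax j' h1 (by omega))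

lemma findDesc_mem (P : Nat → Prop) [DecidablePred P] (k j : Nat)
    (h : findDesc P k = some j) : j ≤ k ∧ P j := by
  induction k with
  | zero =>
      simp only [findDesc] at h
      split_ifs at h with h0
      · cases h; exact ⟨le_refl 0, h0⟩
  | succ k ih =>
      simp only [findDesc] at h
      split_ifs at h with h0
      · cases h; exact ⟨le_refl _, h0⟩
      · obtain ⟨h1, h2⟩ := ih h
        exact ⟨by omega, h2⟩

lemma spec_step (h_ : List Int) (i : Nat) (hi : 2 ≤ i) :
    (dpS h_ i, glS h_ i) =
      match findDesc (fun j => cS h_ j ≤ Pf h_ i) (i - 1) with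
      | some j => (dpS h_ j + 1, Pf h_ i - Pf h_ j)
      | none => (0, 0) := by
  obtain ⟨k, rfl⟩ : ∃ k, i = k + 2 := ⟨i - 2, by omega⟩
  have hpair : (dpS h_ (k+2), glS h_ (k+2)) = nextPair h_ (specTbl h_ (k+1)) (k+2) := by
    have h1 : (specTbl h_ (k+2)).getD (k+2) (0,0) = nextPair h_ (specTbl h_ (k+1)) (k+2) := by
      rw [specTbl, List.getD, List.getElem?_append_right (by rw [specTbl_length]),
          specTbl_length]
      simp
    rw [dpS, glS, h1]
  rw [hpair, nextPair]
  have hcong : findDesc (fun j => Pf h_ (k+2) - Pf h_ j ≥ ((specTbl h_ (k+1)).getD j (0, 0)).2) (k+2-1)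
      = findDesc (fun j => cS h_ j ≤ Pf h_ (k+2)) (k+2-1) := by
    apply findDesc_congr
    intro j hj
    rw [specTbl_getD h_ (k+1) j (by omega)]
    simp only [cS]
    omega
  rw [hcong]
  cases hf : findDesc (fun j => cS h_ j ≤ Pf h_ (k+2)) (k+2-1) with
  | none => rfl
  | some j =>
      obtain ⟨hjle, _⟩ := findDesc_mem _ _ _ hf
      show (((specTbl h_ (k + 1)).getD j (0, 0)).1 + 1, Pf h_ (k + 2) - Pf h_ j)
          = (dpS h_ j + 1, Pf h_ (k + 2) - Pf h_ j)
      rw [specTbl_getD h_ (k+1) j (by omega)]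

lemma dpS_zero (h_ : List Int) : dpS h_ 0 = 0 := rfl
lemma glS_zero (h_ : List Int) : glS h_ 0 = 0 := rfl
lemma dpS_one (h_ : List Int) : dpS h_ 1 = 1 := rfl
lemma glS_one (h_ : List Int) : glS h_ 1 = Pf h_ 1 := rfl

lemma pyRange_desc_zero : PySem.List.pyRange (0:Int) (-1) (-1) = [0] := by decide

lemma pyRange_desc_succ (k : Nat) :
    PySem.List.pyRange ((k:Int)+1) (-1) (-1) = ((k:Int)+1) :: PySem.List.pyRange (k:Int) (-1) (-1) := by
  rw [PySem.List.pyRange_neg_one_eq_reverse, PySem.List.pyRange_neg_one_eq_reverse,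
      PySem.List.pyRange_one_succ_right (by omega : (-1:Int)+1 ≤ (k:Int)+1)]
  simp
-- ---------- A-side: A's arrays realise the spec table ----------

def psF (h_ : List Int) (n : Int) : List Int :=
  (PySem.List.pyRange 1 (n+1) 1).foldl
      (fun ps i => ps.set i.toNat
        (((PySem.List.pyGet? ps (i-1)).getD 0) + ((PySem.List.pyGet? (0 :: h_) i).getD 0)))
      (List.replicate 5010 0)

def astep (ps : List Int) (st : List Int × List Int) (i : Int) : List Int × List Int :=
  match aFind (fun j =>
      ((PySem.List.pyGet? ps i).getD 0) - ((PySem.List.pyGet? ps j).getD 0)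
        ≥ ((PySem.List.pyGet? st.2 j).getD 0)) (PySem.List.pyRange (i-1) (-1) (-1)) with
  | some j => (st.1.set i.toNat (((PySem.List.pyGet? st.1 j).getD 0) + 1),
               st.2.set i.toNat
                 (((PySem.List.pyGet? ps i).getD 0) - ((PySem.List.pyGet? ps j).getD 0)))
  | none => st

def aFold (h_ : List Int) (n m : Int) : List Int × List Int :=
  (PySem.List.pyRange 2 (m+1) 1).foldl (astep (psF h_ n))
    ((List.replicate 5010 0).set 1 1,
     (List.replicate 5010 0).set 1 ((PySem.List.pyGet? (psF h_ n) 1).getD 0))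

lemma solve_eq_body (n : Int) (h_ : List Int) :
    solve n h_ = n - ((PySem.List.pyGet? (aFold h_ n n).1 n).getD 0) := rfl

lemma foldl_set_length (h_ : List Int) (l : List Int) (ps : List Int) :
    (l.foldl (fun ps i => ps.set i.toNat
        (((PySem.List.pyGet? ps (i-1)).getD 0) + ((PySem.List.pyGet? (0 :: h_) i).getD 0))) ps).length
      = ps.length := by
  induction l generalizing ps with
  | nil => rfl
  | cons x xs ih => rw [List.foldl_cons, ih, List.length_set]

lemma psF_length (h_ : List Int) (n : Int) : (psF h_ n).length = 5010 := by
  unfold psF; rw [foldl_set_length, List.length_replicate]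

lemma psF_succ (h_ : List Int) (k : Nat) :
    psF h_ ((k:Int)+1) = (psF h_ (k:Int)).set (((k:Int)+1)).toNat
      (((PySem.List.pyGet? (psF h_ (k:Int)) (((k:Int)+1)-1)).getD 0) +
       ((PySem.List.pyGet? (0 :: h_) ((k:Int)+1)).getD 0)) := by
  unfold psF
  rw [PySem.List.pyRange_one_succ_right (by omega : (1:Int) ≤ (k:Int)+1), List.foldl_append]
  rfl

lemma aFold_succ (h_ : List Int) (n : Int) (k : Nat) (hk : 1 ≤ k) :
    aFold h_ n ((k:Int)+1) = astep (psF h_ n) (aFold h_ n (k:Int)) ((k:Int)+1) := by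
  unfold aFold
  rw [PySem.List.pyRange_one_succ_right (by omega : (2:Int) ≤ (k:Int)+1), List.foldl_append]
  rfl

lemma psF_eq (h_ : List Int) (N : Nat) :
    N ≤ 5009 → N ≤ h_.length → ∀ m : Nat, m < 5010 →
    (psF h_ (N : Int))[m]? = some (if m ≤ N then Pf h_ m else 0) := by
  induction N with
  | zero =>
      intro _ _ m hm
      unfold psF
      rw [show ((0:Nat):Int) = 0 from rfl, PySem.List.pyRange_one_eq_nil (by omega : (1:Int) ≥ 0+1)]
      simp only [List.foldl_nil, List.getElem?_replicate, if_pos hm]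
      congr 1
      split_ifs with h
      · have hm0 : m = 0 := by omega
        subst hm0; rfl
      · rfl
  | succ k ih =>
      intro hcap hlen m hm
      rw [show ((k+1:Nat):Int) = (k:Int)+1 by push_cast; ring, psF_succ,
          show ((k:Int)+1-1) = ((k:Nat):Int) by ring, PySem.List.pyGet?_natCast,
          ih (by omega) (by omega) k (by omega)]
      rw [if_pos (le_refl k), Option.getD_some]
      rw [show ((k:Int)+1) = ((k+1:Nat):Int) by push_cast; ring, PySem.List.pyGet?_natCast,
          List.getElem?_cons_succ, List.getElem?_eq_getElem (by omega : k < h_.length),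
          Option.getD_some]
      rw [show (((k+1:Nat):Int)).toNat = k+1 by omega, List.getElem?_set, psF_length]
      by_cases h1 : k+1 = m
      · subst h1
        rw [if_pos rfl, if_pos (by omega : k+1 < 5010), if_pos (by omega : k+1 ≤ k+1)]
        congr 1
        rw [Pf, List.getD_eq_getElem h_ 0 (by omega)]
      · rw [if_neg h1, ih (by omega) (by omega) m hm]
        congr 1
        exact if_congr (by omega) rfl rfl

lemma ps_get (h_ : List Int) (N t : Nat) (hcap : N ≤ 5009) (hlen : N ≤ h_.length) (ht : t ≤ N) :
    (PySem.List.pyGet? (psF h_ (N:Int)) ((t:Nat):Int)).getD 0 = Pf h_ t := by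
  rw [PySem.List.pyGet?_natCast, psF_eq h_ N hcap hlen t (by omega), Option.getD_some, if_pos ht]

lemma aFold_one (h_ : List Int) (n : Int) :
    aFold h_ n 1 = ((List.replicate 5010 0).set 1 1,
      (List.replicate 5010 0).set 1 ((PySem.List.pyGet? (psF h_ n) 1).getD 0)) := by
  unfold aFold
  rw [PySem.List.pyRange_one_eq_nil (by omega : (1:Int)+1 ≤ 2), List.foldl_nil]

-- A's descending aFind equals the spec's findDesc
lemma aFind_eq_findDesc (p : Int → Bool) (P : Nat → Prop) [DecidablePred P] : ∀ (k : Nat),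
    (∀ j : Nat, j ≤ k → (p (j:Int) = decide (P j))) →
    aFind p (PySem.List.pyRange (k:Int) (-1) (-1)) = (findDesc P k).map (fun j : Nat => (j:Int)) := by
  intro k
  induction k with
  | zero =>
      intro hp
      rw [show ((0:Nat):Int) = 0 from rfl, pyRange_desc_zero]
      simp only [aFind, findDesc]
      rw [show (0:Int) = ((0:Nat):Int) from rfl, hp 0 (le_refl 0)]
      by_cases h0 : P 0
      · simp [h0]
      · simp [h0]
  | succ k ih =>
      intro hp
      rw [show ((k+1:Nat):Int) = (k:Int)+1 by push_cast; ring, pyRange_desc_succ]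
      simp only [aFind, findDesc]
      rw [show ((k:Int)+1) = ((k+1:Nat):Int) by push_cast; ring, hp (k+1) (le_refl _)]
      by_cases h0 : P (k+1)
      · simp [h0]
      · simp only [h0, decide_false, Bool.false_eq_true, if_false]
        exact ih (fun j hj => hp j (by omega))

lemma a_inv (h_ : List Int) (N : Nat) (hcap : N ≤ 5009) (hlen : N ≤ h_.length) :
    ∀ m : Nat, 1 ≤ m → m ≤ N →
    (aFold h_ (N:Int) (m:Int)).1.length = 5010 ∧
    (aFold h_ (N:Int) (m:Int)).2.length = 5010 ∧
    (∀ t : Nat, t < 5010 →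
      (aFold h_ (N:Int) (m:Int)).1[t]? = some (if t ≤ m then dpS h_ t else 0) ∧
      (aFold h_ (N:Int) (m:Int)).2[t]? = some (if t ≤ m then glS h_ t else 0)) := by
  intro m
  induction m with
  | zero => omega
  | succ k ih =>
      intro _ hmN
      by_cases hk0 : k = 0
      · subst hk0
        rw [show ((0+1:Nat):Int) = 1 by norm_num, aFold_one]
        have hps := ps_get h_ N 1 hcap hlen (by omega)
        rw [Nat.cast_one] at hps
        refine ⟨by rw [List.length_set, List.length_replicate],
                by rw [List.length_set, List.length_replicate], ?_⟩
        intro t ht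
        constructor
        · show ((List.replicate 5010 (0:Int)).set 1 1)[t]? = _
          rw [List.getElem?_set, List.length_replicate]
          by_cases h1 : 1 = t
          · rw [if_pos h1, if_pos (by omega)]
            rw [← h1, if_pos (by omega : 1 ≤ 0+1), dpS_one]
          · rw [if_neg h1, List.getElem?_replicate, if_pos ht]
            by_cases ht1 : t ≤ 0+1
            · have ht0 : t = 0 := by omega
              subst ht0
              rw [if_pos ht1, dpS_zero]
            · rw [if_neg ht1]
        · show ((List.replicate 5010 (0:Int)).set 1 ((PySem.List.pyGet? (psF h_ (N:Int)) 1).getD 0))[t]? = _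
          rw [hps, List.getElem?_set, List.length_replicate]
          by_cases h1 : 1 = t
          · rw [if_pos h1, if_pos (by omega)]
            rw [← h1, if_pos (by omega : 1 ≤ 0+1), glS_one]
          · rw [if_neg h1, List.getElem?_replicate, if_pos ht]
            by_cases ht1 : t ≤ 0+1
            · have ht0 : t = 0 := by omega
              subst ht0
              rw [if_pos ht1, glS_zero]
            · rw [if_neg ht1]
      · have hk1 : 1 ≤ k := by omega
        obtain ⟨A1len, A2len, hval⟩ := ih hk1 (by omega)
        have hc : ((k+1:Nat):Int) = (k:Int)+1 := by push_cast; ring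
        rw [hc, aFold_succ h_ (N:Int) k hk1]
        set A := aFold h_ (N:Int) (k:Int) with hA
        have hps_i : (PySem.List.pyGet? (psF h_ (N:Int)) ((k:Int)+1)).getD 0 = Pf h_ (k+1) := by
          rw [show ((k:Int)+1) = ((k+1:Nat):Int) by push_cast; ring]
          exact ps_get h_ N (k+1) hcap hlen (by omega)
        have hfind : aFind (fun j =>
              decide (((PySem.List.pyGet? (psF h_ (N:Int)) ((k:Int)+1)).getD 0) -
                ((PySem.List.pyGet? (psF h_ (N:Int)) j).getD 0)
                 ≥ ((PySem.List.pyGet? A.2 j).getD 0)))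
              (PySem.List.pyRange ((k:Nat):Int) (-1) (-1))
            = (findDesc (fun j => cS h_ j ≤ Pf h_ (k+1)) k).map (fun j : Nat => (j:Int)) := by
          apply aFind_eq_findDesc
          intro j hj
          rw [hps_i, ps_get h_ N j hcap hlen (by omega)]
          have hgl : (PySem.List.pyGet? A.2 ((j:Nat):Int)).getD 0 = glS h_ j := by
            rw [PySem.List.pyGet?_natCast, (hval j (by omega)).2, if_pos (by omega : j ≤ k)]
            rfl
          rw [hgl]
          apply decide_eq_decide.mpr
          unfold cS
          omega
        by_cases hf : ∃ j, findDesc (fun j => cS h_ j ≤ Pf h_ (k+1)) k = some j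
        · obtain ⟨j, hfj⟩ := hf
          obtain ⟨hjk, hjP⟩ := findDesc_mem _ _ _ hfj
          have hspec := spec_step h_ (k+1) (by omega)
          rw [show k+1-1 = k from rfl, hfj] at hspec
          have hdp : dpS h_ (k+1) = dpS h_ j + 1 := congrArg Prod.fst hspec
          have hgl : glS h_ (k+1) = Pf h_ (k+1) - Pf h_ j := congrArg Prod.snd hspec
          have hd1 : (PySem.List.pyGet? A.1 ((j:Nat):Int)).getD 0 = dpS h_ j := by
            rw [PySem.List.pyGet?_natCast, (hval j (by omega)).1, if_pos (by omega : j ≤ k)]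
            rfl
          have hps_j := ps_get h_ N j hcap hlen (by omega)
          have hred : astep (psF h_ (N:Int)) A ((k:Int)+1)
              = (A.1.set (((k:Int)+1)).toNat (dpS h_ j + 1),
                 A.2.set (((k:Int)+1)).toNat (Pf h_ (k+1) - Pf h_ j)) := by
            unfold astep
            rw [show (k:Int)+1-1 = ((k:Nat):Int) by ring, hfind, hfj]
            simp only [Option.map_some]
            rw [hd1, hps_i, hps_j]
          rw [hred]
          have htoNat : (((k:Int)+1)).toNat = k+1 := by omega
          refine ⟨by rw [List.length_set, A1len], by rw [List.length_set, A2len], ?_⟩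
          intro t ht
          constructor
          · rw [List.getElem?_set, htoNat, A1len]
            by_cases he : k+1 = t
            · rw [if_pos he, if_pos (by omega), ← he, if_pos (le_refl _), hdp]
            · rw [if_neg he, (hval t ht).1]
              congr 1
              exact if_congr (by omega) rfl rfl
          · rw [List.getElem?_set, htoNat, A2len]
            by_cases he : k+1 = t
            · rw [if_pos he, if_pos (by omega), ← he, if_pos (le_refl _), hgl]
            · rw [if_neg he, (hval t ht).2]
              congr 1
              exact if_congr (by omega) rfl rfl
        · have hfn : findDesc (fun j => cS h_ j ≤ Pf h_ (k+1)) k = none := by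
            cases hx : findDesc (fun j => cS h_ j ≤ Pf h_ (k+1)) k with
            | none => rfl
            | some j => exact absurd ⟨j, hx⟩ hf
          have hspec := spec_step h_ (k+1) (by omega)
          rw [show k+1-1 = k from rfl, hfn] at hspec
          have hdp : dpS h_ (k+1) = 0 := congrArg Prod.fst hspec
          have hgl : glS h_ (k+1) = 0 := congrArg Prod.snd hspec
          have hred : astep (psF h_ (N:Int)) A ((k:Int)+1) = A := by
            unfold astep
            rw [show (k:Int)+1-1 = ((k:Nat):Int) by ring, hfind, hfn]
            rfl
          rw [hred]
          refine ⟨A1len, A2len, ?_⟩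
          intro t ht
          obtain ⟨h1, h2⟩ := hval t ht
          constructor
          · rw [h1]
            congr 1
            by_cases htk : t ≤ k
            · rw [if_pos htk, if_pos (by omega)]
            · by_cases htk1 : t ≤ k+1
              · have he : t = k+1 := by omega
                subst he
                rw [if_neg htk, if_pos htk1, hdp]
              · rw [if_neg htk, if_neg htk1]
          · rw [h2]
            congr 1
            by_cases htk : t ≤ k
            · rw [if_pos htk, if_pos (by omega)]
            · by_cases htk1 : t ≤ k+1
              · have he : t = k+1 := by omega
                subst he
                rw [if_neg htk, if_pos htk1, hgl]
              · rw [if_neg htk, if_neg htk1]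

lemma solve_pos_spec (h_ : List Int) (N : Nat) (h1 : 1 ≤ N) (hcap : N ≤ 5009) (hlen : N ≤ h_.length) :
    solve (N : Int) h_ = (N : Int) - dpS h_ N := by
  rw [solve_eq_body]
  obtain ⟨A1len, A2len, hval⟩ := a_inv h_ N hcap hlen N h1 (le_refl N)
  rw [PySem.List.pyGet?_natCast, (hval N (by omega)).1, if_pos (le_refl N)]
  rfl

lemma solve_nonpos (n : Int) (h_ : List Int) (hlo : -5010 ≤ n) (hn : n ≤ 0) :
    solve n h_ = n - (if n = -5009 then 1 else 0) := by
  rw [solve_eq_body]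
  unfold aFold
  rw [PySem.List.pyRange_one_eq_nil (by omega : n+1 ≤ 2), List.foldl_nil]
  congr 1
  rcases eq_or_lt_of_le hn with h0 | hneg
  · subst h0
    rw [PySem.List.pyGet?_zero]
    rw [List.getElem?_set]
    norm_num
  · have hk : n = -(((-n).toNat : Nat) : Int) := by omega
    rw [hk, PySem.List.pyGet?_neg_natCast _ _ (by omega)
          (by rw [List.length_set, List.length_replicate]; omega)]
    rw [List.length_set, List.length_replicate, List.getElem?_set]
    by_cases h9 : n = -5009
    · have h59 : 5010 - (-n).toNat = 1 := by omega
      rw [h59]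
      rw [if_pos rfl, if_pos (by rw [List.length_replicate]; omega : (1:Nat) < (List.replicate 5010 (0:Int)).length),
          if_pos (by omega : -(((-n).toNat:Nat):Int) = -5009)]
      rfl
    · have hne : ¬ (1 = 5010 - (-n).toNat) := by omega
      rw [if_neg hne, List.getElem?_replicate, if_pos (by omega : 5010 - (-n).toNat < 5010),
          if_neg (by omega : ¬ -(((-n).toNat:Nat):Int) = -5009)]
      rfl
lemma countP_split (x : Int) : ∀ (cs : List Int), cs.Pairwise (· < ·) →
    ∀ (k : Nat) (hk : k < cs.length),
      ((cs[k]'hk) ≤ x ↔ k < cs.countP (fun c => decide (c ≤ x))) := by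
  intro cs
  induction cs with
  | nil => intro _ k hk; simp at hk
  | cons a l ih =>
      intro hs k hk
      rw [List.pairwise_cons] at hs
      obtain ⟨ha, hl⟩ := hs
      by_cases hax : a ≤ x
      · have hcc : (a :: l).countP (fun c => decide (c ≤ x))
            = l.countP (fun c => decide (c ≤ x)) + 1 := by
          simp [hax]
        cases k with
        | zero =>
            rw [List.getElem_cons_zero, hcc]
            exact iff_of_true hax (by omega)
        | succ k =>
            have hk' : k < l.length := by simp at hk; omega
            rw [List.getElem_cons_succ, hcc, ih hl k hk']
            omega
      · have hcnt : (a :: l).countP (fun c => decide (c ≤ x)) = 0 := by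
          rw [List.countP_eq_zero]
          intro b hb
          rcases List.mem_cons.1 hb with rfl | hbl
          · simpa using hax
          · simp only [decide_eq_true_eq]
            intro hbx
            exact hax (le_trans (le_of_lt (ha b hbl)) hbx)
        rw [hcnt]
        cases k with
        | zero =>
            rw [List.getElem_cons_zero]
            exact iff_of_false hax (by omega)
        | succ k =>
            have hk' : k < l.length := by simp at hk; omega
            rw [List.getElem_cons_succ]
            constructor
            · intro h
              exfalso
              have hmem : l[k]'hk' ∈ l := List.getElem_mem hk'
              exact hax (le_trans (le_of_lt (ha _ hmem)) h)
            · intro h; omega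

lemma bsearch_run (stk : List (Int × Int × Int)) (x S : Int)
    (hsplit : ∀ (k : Nat) (hk : k < stk.length), ((stk[k]'hk).1 ≤ x ↔ (k : Int) < S)) :
    ∀ (fuel : Nat) (lo hi : Int), (hi - lo).toNat ≤ fuel → 0 ≤ lo → lo ≤ S → S ≤ hi →
      hi ≤ (stk.length : Int) → bsearchAux stk x fuel lo hi = S := by
  intro fuel
  induction fuel with
  | zero =>
      intro lo hi hf h0 h1 h2 h3
      show lo = S
      omega
  | succ n ih =>
      intro lo hi hf h0 h1 h2 h3
      rw [bsearchAux]
      by_cases hlt : lo < hi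
      · rw [if_pos hlt]
        have hmid := PySem.Int.floordiv_two_mid_bounds (le_of_lt hlt) (lo := lo) (hi := hi)
        have hmidlt : PySem.Int.floordiv (lo + hi) 2 < hi := by
          rw [PySem.Int.floordiv_lt_iff_lt_mul (by omega)]; omega
        have hmlen : (PySem.Int.floordiv (lo + hi) 2).toNat < stk.length := by omega
        have hmn : PySem.Int.floordiv (lo + hi) 2
            = (((PySem.Int.floordiv (lo + hi) 2).toNat : Nat) : Int) := by omega
        have hget : (PySem.List.pyGet? stk (PySem.Int.floordiv (lo + hi) 2)).getD (0, 0, 0)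
            = stk[(PySem.Int.floordiv (lo + hi) 2).toNat]'hmlen := by
          conv_lhs => rw [hmn]
          rw [PySem.List.pyGet?_natCast, List.getElem?_eq_getElem hmlen]
          rfl
        rw [hget]
        by_cases hc : (stk[(PySem.Int.floordiv (lo + hi) 2).toNat]'hmlen).1 ≤ x
        · rw [if_pos hc]
          have hS := (hsplit _ hmlen).1 hc
          exact ih (PySem.Int.floordiv (lo + hi) 2 + 1) hi (by omega) (by omega) (by omega) h2 h3
        · rw [if_neg hc]
          have hS : ¬ (((PySem.Int.floordiv (lo + hi) 2).toNat : Int) < S) :=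
            fun hlt2 => hc ((hsplit _ hmlen).2 hlt2)
          exact ih lo (PySem.Int.floordiv (lo + hi) 2) (by omega) h0 h1 (by omega) (by omega)
      · rw [if_neg hlt]; omega

lemma bsearch_spec (stk : List (Int × Int × Int)) (x : Int)
    (hs : (stk.map (·.1)).Pairwise (· < ·)) :
    bsearch stk x 0 (stk.length : Int) = (stk.countP (fun t => decide (t.1 ≤ x)) : Int) := by
  have hcnt : (stk.map (·.1)).countP (fun c => decide (c ≤ x))
      = stk.countP (fun t => decide (t.1 ≤ x)) := by
    rw [List.countP_map]; rfl
  have hsplit : ∀ (k : Nat) (hk : k < stk.length),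
      ((stk[k]'hk).1 ≤ x ↔ (k : Int) < (stk.countP (fun t => decide (t.1 ≤ x)) : Int)) := by
    intro k hk
    have hk' : k < (stk.map (·.1)).length := by simpa using hk
    have h := countP_split x (stk.map (·.1)) hs k hk'
    rw [List.getElem_map, hcnt] at h
    rw [h]
    exact_mod_cast Iff.rfl
  have hle : stk.countP (fun t => decide (t.1 ≤ x)) ≤ stk.length := List.countP_le_length
  exact bsearch_run stk x _ hsplit ((stk.length : Int) - 0).toNat 0 (stk.length : Int)
    (le_refl _) (by omega) (by omega) (by omega) (by omega)

lemma bPop_nil (c : Int) : bPop c [] = [] := rfl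

lemma bPop_concat (c : Int) (ys : List (Int × Int × Int)) (t : Int × Int × Int) :
    bPop c (ys ++ [t]) = if c ≤ t.1 then bPop c ys else ys ++ [t] := by
  unfold bPop
  rw [show (ys ++ [t]).length = ys.length + 1 by simp, bPopAux,
      List.getLast?_concat, List.dropLast_concat]
  by_cases hc : c ≤ t.1
  · rw [if_pos ⟨by simp, by simpa⟩, if_pos hc]
  · rw [if_neg (fun hcon => hc (by simpa using hcon.2)), if_neg hc]

lemma takeWhile_all {α : Type} (p : α → Bool) :
    ∀ (l : List α), (∀ a ∈ l, p a = true) → l.takeWhile p = l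
  | [], _ => rfl
  | a :: l, h => by
      rw [List.takeWhile_cons, if_pos (h a List.mem_cons_self), takeWhile_all p l
        (fun b hb => h b (List.mem_cons_of_mem a hb))]

lemma takeWhile_concat_false {α : Type} (p : α → Bool) (t : α) (h : p t = false) :
    ∀ (ys : List α), (ys ++ [t]).takeWhile p = ys.takeWhile p
  | [] => by simp [h]
  | a :: ys => by
      rw [List.cons_append, List.takeWhile_cons, List.takeWhile_cons]
      by_cases ha : p a = true
      · rw [if_pos ha, if_pos ha, takeWhile_concat_false p t h ys]
      · rw [if_neg ha, if_neg ha]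

lemma bPop_sorted (c : Int) (stk : List (Int × Int × Int))
    (hs : (stk.map (·.1)).Pairwise (· < ·)) :
    bPop c stk = stk.takeWhile (fun t => decide (t.1 < c)) := by
  induction stk using List.reverseRecOn with
  | nil => rw [bPop_nil]; rfl
  | append_singleton ys t ih =>
      rw [bPop_concat]
      rw [List.map_append, List.pairwise_append] at hs
      obtain ⟨hys, _, hcross⟩ := hs
      by_cases hc : c ≤ t.1
      · rw [if_pos hc, ih hys,
          takeWhile_concat_false _ t (by simp only [decide_eq_false_iff_not]; omega)]
      · rw [if_neg hc]
        rw [takeWhile_all]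
        intro a ha
        rcases List.mem_append.1 ha with hay | hat
        · have hlt : a.1 < t.1 := by
            apply hcross
            · exact List.mem_map_of_mem hay
            · simp
          simp only [decide_eq_true_eq]; omega
        · rcases List.mem_singleton.1 hat with rfl
          simp only [decide_eq_true_eq]; omega

lemma mem_takeWhile_of_sorted (g : Nat → Int) (c : Int) :
    ∀ (L : List Nat), (L.map g).Pairwise (· < ·) → ∀ j ∈ L, g j < c →
      j ∈ L.takeWhile (fun a => decide (g a < c))
  | [], _, j, hj, _ => by simp at hj
  | a :: L, hs, j, hj, hgj => by
      rw [List.map_cons, List.pairwise_cons] at hs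
      obtain ⟨ha, hL⟩ := hs
      rcases List.mem_cons.1 hj with rfl | hjL
      · rw [List.takeWhile_cons, if_pos (by simpa using hgj)]
        exact List.mem_cons_self
      · have hga : g a < g j := ha (g j) (List.mem_map_of_mem hjL)
        rw [List.takeWhile_cons, if_pos (by simp only [decide_eq_true_eq]; omega)]
        exact List.mem_cons_of_mem a (mem_takeWhile_of_sorted g c L hL j hjL hgj)
-- ---------- B-side: the stack lists the live candidate indices ----------

def fEnt (h_ : List Int) (j : Nat) : Int × Int × Int := (cS h_ j, dpS h_ j, Pf h_ j)

def SInv (h_ : List Int) (m : Nat) (L : List Nat) (stk : List (Int × Int × Int)) : Prop :=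
  stk = L.map (fEnt h_) ∧ L.Pairwise (· < ·) ∧ (L.map (cS h_)).Pairwise (· < ·) ∧
  (∀ j ∈ L, j ≤ m) ∧ (∀ j ≤ m, ∃ j' ∈ L, j ≤ j' ∧ cS h_ j' ≤ cS h_ j)

lemma push_step (h_ : List Int) (m : Nat) (L : List Nat) (stk : List (Int × Int × Int))
    (h : SInv h_ m L stk) :
    SInv h_ (m+1) (L.takeWhile (fun a => decide (cS h_ a < cS h_ (m+1))) ++ [m+1])
      (bPop (cS h_ (m+1)) stk ++ [fEnt h_ (m+1)]) := by
  obtain ⟨hmap, hLp, hcp, hub, hlive⟩ := h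
  have hsorted : (stk.map (·.1)).Pairwise (· < ·) := by
    rw [hmap, List.map_map]
    exact hcp
  have hpop : bPop (cS h_ (m+1)) stk
      = (L.takeWhile (fun a => decide (cS h_ a < cS h_ (m+1)))).map (fEnt h_) := by
    rw [bPop_sorted _ stk hsorted, hmap, List.takeWhile_map]
    rfl
  refine ⟨?_, ?_, ?_, ?_, ?_⟩
  · rw [hpop, List.map_append]
    rfl
  · rw [List.pairwise_append]
    refine ⟨List.Pairwise.sublist (List.takeWhile_sublist _) hLp, List.pairwise_singleton _ _, ?_⟩
    intro a ha b hb
    rcases List.mem_singleton.1 hb with rfl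
    have haL : a ∈ L := (List.takeWhile_sublist _).subset ha
    have := hub a haL
    omega
  · rw [List.map_append, List.pairwise_append]
    refine ⟨List.Pairwise.sublist (List.Sublist.map _ (List.takeWhile_sublist _)) hcp,
      by simp, ?_⟩
    intro a ha b hb
    rcases List.mem_singleton.1 hb with rfl
    obtain ⟨j, hjtw, rfl⟩ := List.mem_map.1 ha
    have := List.mem_takeWhile_imp hjtw
    simpa using this
  · intro j hj
    rcases List.mem_append.1 hj with hjt | hj1
    · have := hub j ((List.takeWhile_sublist _).subset hjt)
      omega
    · rcases List.mem_singleton.1 hj1 with rfl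
      exact le_refl _
  · intro j hjm
    by_cases hj : j = m+1
    · subst hj
      exact ⟨m+1, List.mem_append_right _ (List.mem_singleton_self _), le_refl _, le_refl _⟩
    · have hjm' : j ≤ m := by omega
      obtain ⟨j', hj'L, hjj', hcj'⟩ := hlive j hjm'
      by_cases hlt : cS h_ j' < cS h_ (m+1)
      · exact ⟨j', List.mem_append_left _
          (mem_takeWhile_of_sorted (cS h_) (cS h_ (m+1)) L hcp j' hj'L hlt),
          hjj', hcj'⟩
      · exact ⟨m+1, List.mem_append_right _ (List.mem_singleton_self _), by omega, by omega⟩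

def bFold (h_ : List Int) (m : Int) : List (Int × Int × Int) × Int × Int :=
  (PySem.List.pyRange 1 (m + 1) 1).foldl (bstepF h_) ([(0, 0, 0)], 0, 0)

lemma bFold_succ (h_ : List Int) (k : Nat) :
    bFold h_ ((k:Int)+1) = bstepF h_ (bFold h_ (k:Int)) ((k:Int)+1) := by
  unfold bFold
  rw [PySem.List.pyRange_one_succ_right (by omega : (1:Int) ≤ (k:Int)+1), List.foldl_append]
  rfl

lemma b_inv (h_ : List Int) (N : Nat) (hlen : N ≤ h_.length) :
    ∀ m : Nat, m ≤ N → ∃ L : List Nat,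
      SInv h_ m L (bFold h_ (m:Int)).1 ∧
      (bFold h_ (m:Int)).2.1 = Pf h_ m ∧ (bFold h_ (m:Int)).2.2 = dpS h_ m := by
  intro m
  induction m with
  | zero =>
      intro _
      have h0 : bFold h_ ((0:Nat):Int) = ([(0, 0, 0)], 0, 0) := by
        unfold bFold
        rw [show ((0:Nat):Int) + 1 = 1 by norm_num,
            PySem.List.pyRange_one_eq_nil (le_refl 1), List.foldl_nil]
      refine ⟨[0], ⟨by rw [h0]; rfl, List.pairwise_singleton _ _, List.pairwise_singleton _ _,
        ?_, ?_⟩, by rw [h0]; rfl, by rw [h0]; rfl⟩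
      · intro j hj
        rcases List.mem_singleton.1 hj with rfl
        exact le_refl _
      · intro j hj
        have hj0 : j = 0 := by omega
        subst hj0
        exact ⟨0, List.mem_singleton_self _, le_refl _, le_refl _⟩
  | succ k ih =>
      intro hk1
      obtain ⟨L, hS, hpre, hdp⟩ := ih (by omega)
      obtain ⟨hmap, hLp, hcp, hub, hlive⟩ := hS
      rw [show ((k+1:Nat):Int) = (k:Int)+1 by push_cast; ring, bFold_succ]
      set st := bFold h_ (k:Int) with hst
      have hpree : st.2.1 + (PySem.List.pyGet? h_ ((k:Int)+1 - 1)).getD 0 = Pf h_ (k+1) := by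
        rw [hpre, show (k:Int)+1-1 = ((k:Nat):Int) by ring, PySem.List.pyGet?_natCast,
            List.getElem?_eq_getElem (by omega : k < h_.length)]
        show Pf h_ k + h_[k] = Pf h_ (k+1)
        rw [Pf, List.getD_eq_getElem h_ 0 (by omega)]
      have hkey : bstepF h_ st ((k:Int)+1)
          = (bPop (cS h_ (k+1)) st.1 ++ [fEnt h_ (k+1)], Pf h_ (k+1), dpS h_ (k+1)) := by
        by_cases hk0 : k = 0
        · subst hk0
          simp only [bstepF]
          rw [hpree, if_pos (by norm_num : ((0:Nat):Int)+1 = 1)]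
          have h1 : cS h_ (0+1) = Pf h_ (0+1) + Pf h_ (0+1) := by
            unfold cS
            rw [glS_one]
          have h2 : dpS h_ (0+1) = 1 := dpS_one h_
          simp [fEnt, h1, h2]
        · have hk2 : 1 ≤ k := by omega
          simp only [bstepF]
          rw [hpree, if_neg (by omega : ¬ ((k:Int)+1 = 1))]
          set x := Pf h_ (k+1) with hx
          set SL := L.countP (fun j => decide (cS h_ j ≤ x)) with hSL
          have hbs : bsearch st.1 x 0 ((st.1.length : Nat) : Int) = (SL : Int) := by
            have hs1 : (st.1.map (·.1)).Pairwise (· < ·) := by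
              rw [hmap, List.map_map]; exact hcp
            rw [bsearch_spec st.1 x hs1]
            congr 1
            rw [hmap, List.countP_map]
            rfl
          have hcntc : SL = (L.map (cS h_)).countP (fun cc => decide (cc ≤ x)) := by
            rw [List.countP_map]
            rfl
          rw [hbs]
          by_cases hS0 : SL = 0
          · rw [if_pos (by rw [hS0]; rfl)]
            have hnone : findDesc (fun j => cS h_ j ≤ x) k = none := by
              rw [findDesc_eq_none_iff]
              intro j hj hPj
              obtain ⟨j', hj'L, _, hcj'⟩ := hlive j hj
              have := List.countP_eq_zero.1 hS0 j' hj'L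
              simp only [decide_eq_true_eq] at this
              exact this (by omega)
            have hspec := spec_step h_ (k+1) (by omega)
            rw [show k+1-1 = k from rfl, hnone] at hspec
            have hdp0 : dpS h_ (k+1) = 0 := congrArg Prod.fst hspec
            have hgl0 : glS h_ (k+1) = 0 := congrArg Prod.snd hspec
            have h1 : cS h_ (k+1) = x + 0 := by unfold cS; omega
            simp [fEnt, h1, hdp0]
            exact hx
          · rw [if_neg (by omega : ¬ ((SL : Int) = 0))]
            have hSle : SL ≤ L.length := List.countP_le_length
            have hidx : SL - 1 < L.length := by omega
            have hgetS : (PySem.List.pyGet? st.1 ((SL : Int) - 1)).getD (0, 0, 0)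
                = fEnt h_ (L[SL-1]'hidx) := by
              rw [hmap, show (SL:Int)-1 = ((SL-1 : Nat):Int) by omega, PySem.List.pyGet?_natCast,
                  List.getElem?_map, List.getElem?_eq_getElem hidx]
              rfl
            have hjmem : L[SL-1]'hidx ∈ L := List.getElem_mem hidx
            have hidxm : SL - 1 < (L.map (cS h_)).length := by simpa using hidx
            have hsplit1 := countP_split x (L.map (cS h_)) hcp (SL-1) hidxm
            rw [List.getElem_map] at hsplit1
            have hPj : cS h_ (L[SL-1]'hidx) ≤ x := hsplit1.2 (by omega)
            have hmax : ∀ j', (L[SL-1]'hidx) < j' → j' ≤ k → ¬ (cS h_ j' ≤ x) := by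
              intro j' hgt hle hcle
              obtain ⟨j'', hj''L, hj'le, hcle2⟩ := hlive j' hle
              obtain ⟨p, hp, hpe⟩ := List.mem_iff_getElem.1 hj''L
              have hpm : p < (L.map (cS h_)).length := by simpa using hp
              have hsplit2 := countP_split x (L.map (cS h_)) hcp p hpm
              rw [List.getElem_map] at hsplit2
              have hcp' : cS h_ (L[p]'hp) ≤ x := by rw [hpe]; omega
              have hpS : p < SL := by rw [hcntc]; exact hsplit2.1 hcp'
              have hmono : L[p]'hp ≤ L[SL-1]'hidx := by
                rcases Nat.lt_or_ge p (SL-1) with hplt | hpge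
                · exact le_of_lt ((List.pairwise_iff_getElem.1 hLp) p (SL-1) hp hidx hplt)
                · have hpe2 : p = SL - 1 := by omega
                  subst hpe2
                  exact le_refl _
              rw [hpe] at hmono
              omega
            have hsome : findDesc (fun j => cS h_ j ≤ x) k = some (L[SL-1]'hidx) :=
              findDesc_eq_some _ k _ (hub _ hjmem) hPj hmax
            have hspec := spec_step h_ (k+1) (by omega)
            rw [show k+1-1 = k from rfl, hsome] at hspec
            have hdp1 : dpS h_ (k+1) = dpS h_ (L[SL-1]'hidx) + 1 := congrArg Prod.fst hspec
            have hgl1 : glS h_ (k+1) = x - Pf h_ (L[SL-1]'hidx) := congrArg Prod.snd hspec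
            rw [hgetS]
            have h1 : cS h_ (k+1) = x + (x - Pf h_ (L[SL-1]'hidx)) := by unfold cS; omega
            simp [fEnt, h1, hdp1]
            exact hx
      rw [hkey]
      exact ⟨_, push_step h_ k L st.1 ⟨hmap, hLp, hcp, hub, hlive⟩, rfl, rfl⟩

lemma solve_alt_pos_spec (h_ : List Int) (N : Nat) (h1 : 1 ≤ N) (hlen : N ≤ h_.length) :
    solve_alt (N : Int) h_ = (N : Int) - dpS h_ N := by
  unfold solve_alt
  rw [if_neg (by omega : ¬ ((N:Int) ≤ 0))]
  obtain ⟨L, hS, hpre, hdp⟩ := b_inv h_ N hlen N (le_refl N)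
  show (N:Int) - (bFold h_ (N:Int)).2.2 = _
  rw [hdp]

lemma solve_alt_nonpos (n : Int) (h_ : List Int) (hn : n ≤ 0) : solve_alt n h_ = n := by
  unfold solve_alt
  rw [if_pos hn]

-- ===== VERDICT (by name: the statement is the Claim_ definition above) =====
theorem solve_spec : Claim_unchanged_solve := by
  intro n h_ _dom pre hD
  obtain ⟨hlo, hcap, hlen⟩ := pre
  by_cases hn : n ≤ 0
  · rw [solve_nonpos n h_ hlo hn, solve_alt_nonpos n h_ hn]
    rw [if_neg (by simpa [D_solve] using hD)]
    ring
  · have hN : n = ((n.toNat : Nat) : Int) := by omega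
    rw [hN, solve_pos_spec h_ n.toNat (by omega) (by omega) (by omega),
        solve_alt_pos_spec h_ n.toNat (by omega) (by omega)]

theorem solve_changed : Claim_changed_solve := by
  unfold Claim_changed_solve
  refine ⟨by decide, by decide, by decide, ?_, ?_, by decide⟩
  · show solve (-5009) [] = -5010
    rw [solve_nonpos (-5009) [] (by norm_num) (by norm_num)]
    norm_num
  · show solve_alt (-5009) [] = -5009
    rw [solve_alt_nonpos (-5009) [] (by norm_num)]

theorem solve_tight : Claim_exact_solve := by
  intro n h_ _dom pre hD
  obtain ⟨hlo, hcap, hlen⟩ := pre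
  have hn : n = -5009 := hD
  rw [solve_nonpos n h_ hlo (by omega), solve_alt_nonpos n h_ (by omega), if_pos hn]
  omega
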